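-- pv_equiv track=rewrite | github.com/longshirong/python | LeetCode/number/isNumber.py | isNumber
-- ===== SOURCE A (Python) =====
-- def isNumber(s: str) -> bool:
--     s = s.strip()
--     met_dot = met_e = met_digit = False
--
--     for i, char in enumerate(s):
--         if char in ('+', '-'):
--             if i > 0 and s[i - 1] != 'e' and s[i - 1] != 'E':
--                 return False
--         elif char == '.':
--             if met_dot or met_e:
--                 return False
--             met_dot = True
--         elif char == 'e' or char == 'E':
--             if met_e or not met_digit:
--                 return False
--             met_e, met_digit = True, False  # e后必须接，所以这时重置met_digit为False,以免e为最后一个char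
--         elif char.isdigit():
--             met_digit = True
--         else:
--             return False
--     return met_digit
-- ===== SOURCE B (Python) =====
-- def isNumber(s: str) -> bool:
--     t = s.strip()
--     low = t.lower()
--     i = low.find('e')
--     if i < 0:
--         return _valid(t, True)
--     if 'e' in low[i + 1:]:
--         return False
--     return _valid(t[:i], True) and _valid(t[i + 1:], False)
--
--
-- def _valid(t: str, allow_dot: bool) -> bool:
--     if t and t[0] in '+-':
--         t = t[1:]
--     has_digit = has_dot = False
--     for c in t:
--         if c == '.':
--             if has_dot or not allow_dot:
--                 return False
--             has_dot = True
--         elif c.isdigit():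
--             has_digit = True
--         else:
--             return False
--     return has_digit
-- ===== Notes on version B (the rewrite author's own statement) =====
-- stated objective: alternative
-- what changed: A's single-pass state machine (met_dot/met_e/met_digit flags with s[i-1] lookbehind for signs) is replaced by splitting the string at the unique 'e'/'E' and validating the mantissa and exponent independently with one shared part-validator.
import Mathlib
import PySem

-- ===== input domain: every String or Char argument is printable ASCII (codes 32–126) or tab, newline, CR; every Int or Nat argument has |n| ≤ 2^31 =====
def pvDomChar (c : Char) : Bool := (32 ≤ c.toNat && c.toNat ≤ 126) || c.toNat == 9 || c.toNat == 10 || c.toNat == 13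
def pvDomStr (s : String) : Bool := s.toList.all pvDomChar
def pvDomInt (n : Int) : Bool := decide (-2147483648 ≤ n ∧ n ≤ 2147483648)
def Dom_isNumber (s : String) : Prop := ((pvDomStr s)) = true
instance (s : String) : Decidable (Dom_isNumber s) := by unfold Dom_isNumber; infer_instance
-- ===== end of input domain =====

-- B replaces A's one-pass state machine (flags + previous-character lookups) by a split at the
-- unique 'e'/'E' followed by two independent part validations (mantissa / exponent): objective 'alternative'.

-- ===== PORT A =====
-- the for-loop of A: state (met_dot, met_e, met_digit), index i, and s[i-1] lookups on the full list
def isNumberGo (l : List Char) (rest : List Char) (i : Int)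
    (metDot metE metDigit : Bool) : Bool :=
  match rest with
  | [] => metDigit
  | c :: rs =>
    if c = '+' ∨ c = '-' then
      if i > 0 ∧ PySem.List.pyGet? l (i - 1) ≠ some 'e' ∧ PySem.List.pyGet? l (i - 1) ≠ some 'E'
      then false
      else isNumberGo l rs (i + 1) metDot metE metDigit
    else if c = '.' then
      if metDot ∨ metE then false
      else isNumberGo l rs (i + 1) true metE metDigit
    else if c = 'e' ∨ c = 'E' then
      if metE ∨ metDigit = false then false
      else isNumberGo l rs (i + 1) metDot true false
    else if PySem.Chars.isdigit c then
      isNumberGo l rs (i + 1) metDot metE true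
    else false

def isNumber (s : String) : Bool :=
  let t := (PySem.Str.strip s).toList
  isNumberGo t t 0 false false false

-- ===== PORT B =====
-- the for-loop of B's _valid: flags (has_digit, has_dot)
def validLoop (allowDot : Bool) (t : List Char) (hasDigit hasDot : Bool) : Bool :=
  match t with
  | [] => hasDigit
  | c :: rs =>
    if c = '.' then
      if hasDot || !allowDot then false
      else validLoop allowDot rs hasDigit true
    else if PySem.Chars.isdigit c then validLoop allowDot rs true hasDot
    else false

-- B's _valid(t, allow_dot): strip one leading sign, then scan
def validPart (t : List Char) (allowDot : Bool) : Bool :=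
  match t with
  | c :: rs =>
    if c = '+' ∨ c = '-' then validLoop allowDot rs false false
    else validLoop allowDot (c :: rs) false false
  | [] => validLoop allowDot [] false false

def isNumber_alt (s : String) : Bool :=
  let t := (PySem.Str.strip s).toList
  let low := PySem.Chars.lower t
  let i := PySem.Chars.find low ['e']
  if i < 0 then validPart t true
  else if PySem.Chars.isIn ['e'] (PySem.List.slice low (some (i + 1)) none) then false
  else validPart (PySem.List.slice t none (some i)) true
       && validPart (PySem.List.slice t (some (i + 1)) none) false

-- ===== PRECONDITION & SPEC =====
def Spec_isNumber (s : String) (out : Bool) : Prop := out = isNumber_alt s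
instance (s : String) (out : Bool) : Decidable (Spec_isNumber s out) := by unfold Spec_isNumber; infer_instance

-- ===== CLAIM (what is proved, stated in full; the proofs are below) =====
def Claim_equal_isNumber : Prop := ∀ (s : String), Dom_isNumber s → Spec_isNumber s (isNumber s)

-- ===== LEMMAS AND PROOFS =====

-- split a list at its first 'e'/'E' (proof-side description of what both programs do)
def splitE : List Char → Option (List Char × List Char)
  | [] => none
  | c :: rs =>
    if c = 'e' ∨ c = 'E' then some ([], rs)
    else match splitE rs with
         | none => none
         | some (a, b) => some (c :: a, b)

def bSpec (l : List Char) : Bool :=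
  match splitE l with
  | none => validPart l true
  | some (a, b) => validPart a true && validPart b false

lemma char_eq_of_toNat (a b : Char) (h : a.toNat = b.toNat) : a = b := by
  have := congrArg Char.ofNat h
  rwa [Char.ofNat_toNat, Char.ofNat_toNat] at this

lemma lowerChar_eq_e_iff (c : Char) : PySem.Chars.lowerChar c = 'e' ↔ (c = 'e' ∨ c = 'E') := by
  unfold PySem.Chars.lowerChar PySem.Chars.isupper
  constructor
  · intro h
    by_cases hu : ('A' ≤ c ∧ c ≤ 'Z')
    · right
      have h1 : 65 ≤ c.toNat := hu.1
      have h2 : c.toNat ≤ 90 := hu.2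
      rw [if_pos (by simp [hu.1, hu.2])] at h
      have hv : (Char.ofNat (c.toNat + 32)).toNat = c.toNat + 32 := by
        rw [Char.toNat_ofNat, if_pos]; exact Or.inl (by omega)
      rw [h] at hv
      apply char_eq_of_toNat
      have : ('e').toNat = 101 := by decide
      have : ('E').toNat = 69 := by decide
      omega
    · left
      rw [if_neg (by simp only [Bool.and_eq_true, decide_eq_true_eq]; exact fun h => hu ⟨h.1, h.2⟩)] at h
      exact h
  · rintro (rfl | rfl) <;> decide

-- previous-character lookup: s[i-1] at position i = |pre| is the last char of the processed prefix
lemma pyGet?_pre (pre rest : List Char) (h : pre ≠ []) :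
    PySem.List.pyGet? (pre ++ rest) ((pre.length : Int) - 1) = pre.getLast? := by
  have hl : 0 < pre.length := List.length_pos_iff.mpr h
  have h1 : ((pre.length : Int) - 1) = ((pre.length - 1 : Nat) : Int) := by omega
  rw [h1, PySem.List.pyGet?_natCast, List.getElem?_append_left (by omega),
    List.getLast?_eq_getElem?]

-- closed form of B's exponent scan
lemma validLoop_false (rs : List Char) (h hd : Bool) :
    validLoop false rs h hd = ((h || !rs.isEmpty) && rs.all PySem.Chars.isdigit) := by
  induction rs generalizing h hd with
  | nil => simp [validLoop]
  | cons c rs ih =>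
    by_cases hc : c = '.'
    · subst hc; simp [validLoop, PySem.Chars.isdigit]
    · by_cases hdg : PySem.Chars.isdigit c
      · simp [validLoop, hc, hdg, ih]
      · simp [validLoop, hc, hdg]

-- A's loop after the 'e', past the exponent's first character
lemma goExpMid (rest : List Char) (pre : List Char) (d g : Bool) (hpre : pre ≠ [])
    (he : pre.getLast? ≠ some 'e') (hE : pre.getLast? ≠ some 'E') :
    isNumberGo (pre ++ rest) rest (pre.length : Int) d true g
      = ((g || !rest.isEmpty) && rest.all PySem.Chars.isdigit) := by
  induction rest generalizing pre d g with
  | nil => simp [isNumberGo]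
  | cons c rs ih =>
    have hl : 0 < pre.length := List.length_pos_iff.mpr hpre
    have hstep : pre ++ c :: rs = (pre ++ [c]) ++ rs := by simp
    rw [isNumberGo]
    by_cases h1 : c = '+' ∨ c = '-'
    · rw [if_pos h1, if_pos ⟨by exact_mod_cast hl, by rw [pyGet?_pre _ _ hpre]; exact he,
        by rw [pyGet?_pre _ _ hpre]; exact hE⟩]
      have : PySem.Chars.isdigit c = false := by rcases h1 with rfl | rfl <;> decide
      simp [this]
    · rw [if_neg h1]
      by_cases h2 : c = '.'
      · subst h2
        rw [if_pos rfl, if_pos (Or.inr rfl)]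
        simp [PySem.Chars.isdigit]
      · rw [if_neg h2]
        by_cases h3 : c = 'e' ∨ c = 'E'
        · rw [if_pos h3, if_pos (Or.inl rfl)]
          have : PySem.Chars.isdigit c = false := by rcases h3 with rfl | rfl <;> decide
          simp [this]
        · rw [if_neg h3]
          by_cases h4 : PySem.Chars.isdigit c
          · rw [if_pos h4, hstep]
            have hlen : (pre.length : Int) + 1 = (((pre ++ [c]).length : Nat) : Int) := by simp
            rw [hlen, ih (pre ++ [c]) d true (by simp)
              (by simp; intro hce; subst hce; simp [PySem.Chars.isdigit] at h4)
              (by simp; intro hce; subst hce; simp [PySem.Chars.isdigit] at h4)]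
            simp [h4]
          · rw [if_neg h4]
            simp [h4]

-- A's loop right after consuming the 'e' = B's exponent validation
lemma goExpStart (rest : List Char) (pre : List Char) (d : Bool) (p : Char)
    (hp : pre.getLast? = some p) (hpe : p = 'e' ∨ p = 'E') :
    isNumberGo (pre ++ rest) rest (pre.length : Int) d true false = validPart rest false := by
  have hl : 0 < pre.length := by
    cases pre
    · simp at hp
    · simp
  have hpre : pre ≠ [] := by intro h; subst h; simp at hl
  match rest with
  | [] => simp [isNumberGo, validPart, validLoop]
  | c :: rs =>
    rw [isNumberGo]
    have hstep : pre ++ c :: rs = (pre ++ [c]) ++ rs := by simp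
    have hlen : (pre.length : Int) + 1 = (((pre ++ [c]).length : Nat) : Int) := by simp
    by_cases h1 : c = '+' ∨ c = '-'
    · rw [if_pos h1, if_neg (by
        rw [pyGet?_pre _ _ hpre, hp]
        rcases hpe with rfl | rfl
        · rintro ⟨-, h, -⟩; exact h rfl
        · rintro ⟨-, -, h⟩; exact h rfl)]
      rw [hstep, hlen, goExpMid rs (pre ++ [c]) d false (by simp)
        (by simp; rintro rfl; rcases h1 with h | h <;> simp at h)
        (by simp; rintro rfl; rcases h1 with h | h <;> simp at h)]
      rw [validPart, if_pos h1, validLoop_false]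
    · rw [if_neg h1]
      by_cases h2 : c = '.'
      · subst h2
        rw [if_pos rfl, if_pos (Or.inr rfl)]
        rw [validPart, if_neg h1, validLoop]
        simp
      · rw [if_neg h2]
        by_cases h3 : c = 'e' ∨ c = 'E'
        · rw [if_pos h3, if_pos (Or.inl rfl)]
          have hdg : PySem.Chars.isdigit c = false := by rcases h3 with rfl | rfl <;> decide
          rw [validPart, if_neg h1, validLoop, if_neg h2, hdg]
          simp
        · rw [if_neg h3]
          by_cases h4 : PySem.Chars.isdigit c
          · rw [if_pos h4, hstep, hlen, goExpMid rs (pre ++ [c]) d true (by simp)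
              (by simp; rintro rfl; simp [PySem.Chars.isdigit] at h4)
              (by simp; rintro rfl; simp [PySem.Chars.isdigit] at h4)]
            rw [validPart, if_neg h1, validLoop, if_neg h2, if_pos h4, validLoop_false]
          · rw [if_neg h4]
            rw [validPart, if_neg h1, validLoop, if_neg h2, if_neg (by simp [h4])]

-- A's loop before the 'e', past the first character
lemma goMant (rest : List Char) (pre : List Char) (d g : Bool) (hpre : pre ≠ [])
    (he : pre.getLast? ≠ some 'e') (hE : pre.getLast? ≠ some 'E') :
    isNumberGo (pre ++ rest) rest (pre.length : Int) d false g
      = (match splitE rest with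
         | none => validLoop true rest g d
         | some (a, b) => validLoop true a g d && validPart b false) := by
  induction rest generalizing pre d g with
  | nil => simp [isNumberGo, splitE, validLoop]
  | cons c rs ih =>
    have hl : 0 < pre.length := List.length_pos_iff.mpr hpre
    have hstep : pre ++ c :: rs = (pre ++ [c]) ++ rs := by simp
    have hlen : (pre.length : Int) + 1 = (((pre ++ [c]).length : Nat) : Int) := by simp
    rw [isNumberGo]
    by_cases h1 : c = '+' ∨ c = '-'
    · have h3 : ¬(c = 'e' ∨ c = 'E') := by rcases h1 with rfl | rfl <;> simp
      have hdg : PySem.Chars.isdigit c = false := by rcases h1 with rfl | rfl <;> decide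
      have hdot : c ≠ '.' := by rcases h1 with rfl | rfl <;> simp
      rw [if_pos h1, if_pos ⟨by exact_mod_cast hl, by rw [pyGet?_pre _ _ hpre]; exact he,
        by rw [pyGet?_pre _ _ hpre]; exact hE⟩]
      rw [splitE, if_neg h3]
      rcases hs : splitE rs with - | ⟨a, b⟩ <;>
        simp only [hs] <;> rw [validLoop, if_neg hdot, hdg] <;> simp
    · rw [if_neg h1]
      by_cases h2 : c = '.'
      · subst h2
        rw [if_pos rfl]
        have hsE : ¬('.' = 'e' ∨ '.' = 'E') := by decide
        by_cases hd : d
        · subst hd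
          rw [if_pos (Or.inl rfl), splitE, if_neg hsE]
          rcases hs : splitE rs with - | ⟨a, b⟩ <;>
            simp only [hs] <;> rw [validLoop, if_pos rfl, if_pos (by simp)] <;> simp
        · simp only [Bool.not_eq_true] at hd
          subst hd
          rw [if_neg (by simp), hstep, hlen,
            ih (pre ++ ['.']) true g (by simp) (by simp) (by simp), splitE, if_neg hsE]
          rcases hs : splitE rs with - | ⟨a, b⟩ <;>
            simp only [hs] <;> rw [validLoop, if_pos rfl, if_neg (by simp)]
      · rw [if_neg h2]
        by_cases h3 : c = 'e' ∨ c = 'E'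
        · rw [if_pos h3, splitE, if_pos h3]
          by_cases hg : g
          · subst hg
            rw [if_neg (by simp)]
            rw [hstep, hlen, goExpStart rs (pre ++ [c]) d c (by simp) h3]
            simp [validLoop]
          · simp only [Bool.not_eq_true] at hg
            subst hg
            rw [if_pos (Or.inr rfl)]
            simp [validLoop]
        · rw [if_neg h3]
          by_cases h4 : PySem.Chars.isdigit c
          · rw [if_pos h4, hstep, hlen, ih (pre ++ [c]) d true (by simp)
              (by simp; rintro rfl; simp [PySem.Chars.isdigit] at h4)
              (by simp; rintro rfl; simp [PySem.Chars.isdigit] at h4)]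
            rw [splitE, if_neg h3]
            rcases hs : splitE rs with - | ⟨a, b⟩ <;>
              simp only [hs] <;> rw [validLoop, if_neg h2, if_pos h4]
          · rw [if_neg h4, splitE, if_neg h3]
            rcases hs : splitE rs with - | ⟨a, b⟩ <;>
              simp only [hs] <;> rw [validLoop, if_neg h2, if_neg (by simp [h4])] <;> simp

lemma goTop (l : List Char) : isNumberGo l l 0 false false false = bSpec l := by
  match l with
  | [] => simp [isNumberGo, bSpec, splitE, validPart, validLoop]
  | c :: rs =>
    have hstep : c :: rs = [c] ++ rs := rfl
    have hlen : (0 : Int) + 1 = ((([c] : List Char).length : Nat) : Int) := by simp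
    rw [isNumberGo, bSpec]
    by_cases h1 : c = '+' ∨ c = '-'
    · have h3 : ¬(c = 'e' ∨ c = 'E') := by rcases h1 with rfl | rfl <;> simp
      rw [if_pos h1, if_neg (by rintro ⟨h, -, -⟩; omega)]
      conv_lhs => rw [hstep, hlen]
      rw [goMant rs [c] false false (by simp)
        (by simp; rintro rfl; rcases h1 with h | h <;> simp at h)
        (by simp; rintro rfl; rcases h1 with h | h <;> simp at h)]
      rw [splitE, if_neg h3]
      rcases hs : splitE rs with - | ⟨a, b⟩ <;> simp only [hs] <;>
        rw [validPart, if_pos h1]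
    · rw [if_neg h1]
      by_cases h2 : c = '.'
      · subst h2
        rw [if_pos rfl, if_neg (by simp)]
        conv_lhs => rw [hstep, hlen]
        rw [goMant rs ['.'] true false (by simp) (by simp) (by simp)]
        rw [splitE, if_neg (by simp)]
        rcases hs : splitE rs with - | ⟨a, b⟩ <;> simp only [hs] <;>
          rw [validPart, if_neg h1, validLoop, if_pos rfl, if_neg (by simp)]
      · rw [if_neg h2]
        by_cases h3 : c = 'e' ∨ c = 'E'
        · rw [if_pos h3, if_pos (Or.inr rfl), splitE, if_pos h3]
          simp [validPart, validLoop]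
        · rw [if_neg h3]
          by_cases h4 : PySem.Chars.isdigit c
          · rw [if_pos h4]
            conv_lhs => rw [hstep, hlen]
            rw [goMant rs [c] false true (by simp)
              (by simp; rintro rfl; simp [PySem.Chars.isdigit] at h4)
              (by simp; rintro rfl; simp [PySem.Chars.isdigit] at h4)]
            rw [splitE, if_neg h3]
            rcases hs : splitE rs with - | ⟨a, b⟩ <;> simp only [hs] <;>
              rw [validPart, if_neg h1, validLoop, if_neg h2, if_pos h4]
          · rw [if_neg h4, splitE, if_neg h3]
            rcases hs : splitE rs with - | ⟨a, b⟩ <;> simp only [hs] <;>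
              rw [validPart, if_neg h1, validLoop, if_neg h2, if_neg (by simp [h4])] <;> simp

lemma splitE_eq_none (l : List Char) (h : ∀ c ∈ l, ¬(c = 'e' ∨ c = 'E')) : splitE l = none := by
  induction l with
  | nil => rfl
  | cons c rs ih =>
    rw [splitE, if_neg (h c (by simp)), ih (fun x hx => h x (by simp [hx]))]

lemma splitE_eq_some (l : List Char) (k : Nat)
    (he : l[k]? = some 'e' ∨ l[k]? = some 'E')
    (hmin : ∀ j < k, l[j]? ≠ some 'e' ∧ l[j]? ≠ some 'E') :
    splitE l = some (l.take k, l.drop (k + 1)) := by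
  induction l generalizing k with
  | nil => simp at he
  | cons c rs ih =>
    cases k with
    | zero =>
      simp only [List.getElem?_cons_zero, Option.some.injEq] at he
      rw [splitE, if_pos (by rcases he with h | h <;> simp [h])]
      simp
    | succ k =>
      have h0 := hmin 0 (Nat.succ_pos k)
      simp only [List.getElem?_cons_zero, ne_eq, Option.some.injEq] at h0
      rw [splitE, if_neg (by tauto)]
      rw [ih k (by simpa using he) (fun j hj => by simpa using hmin (j + 1) (by omega))]
      simp

-- an 'e'/'E' anywhere makes B's exponent validation fail
lemma validPart_false_of_mem (b : List Char) (c : Char) (hc : c ∈ b) (he : c = 'e' ∨ c = 'E') :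
    validPart b false = false := by
  have hall : ∀ t : List Char, c ∈ t → t.all PySem.Chars.isdigit = false := by
    intro t hct
    apply List.all_eq_false.mpr
    exact ⟨c, hct, by rcases he with rfl | rfl <;> decide⟩
  match b with
  | [] => simp at hc
  | x :: rs =>
    simp only [validPart]
    split_ifs with hx
    · have hcm : c ∈ rs := by
        rcases List.mem_cons.mp hc with rfl | hcm
        · exfalso; rcases hx with rfl | rfl <;> simp at he
        · exact hcm
      rw [validLoop_false]; simp [hall _ hcm]
    · rw [validLoop_false]; simp [hall _ hc]

lemma bTop (l : List Char) :
    (let low := PySem.Chars.lower l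
     let i := PySem.Chars.find low ['e']
     if i < 0 then validPart l true
     else if PySem.Chars.isIn ['e'] (PySem.List.slice low (some (i + 1)) none) then false
     else validPart (PySem.List.slice l none (some i)) true
          && validPart (PySem.List.slice l (some (i + 1)) none) false) = bSpec l := by
  dsimp only
  have hmap : PySem.Chars.lower l = l.map PySem.Chars.lowerChar := rfl
  have hhead : ∀ (a : Char) (xs : List Char), [a] <+: xs ↔ xs.head? = some a := by
    intro a xs
    cases xs with
    | nil => simp
    | cons x xs => rw [List.cons_prefix_cons]; simp [eq_comm]
  by_cases hneg : PySem.Chars.find (PySem.Chars.lower l) ['e'] < 0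
  · rw [if_pos hneg]
    have h1 : PySem.Chars.find (PySem.Chars.lower l) ['e'] = -1 := by
      have := PySem.Chars.neg_one_le_find (PySem.Chars.lower l) ['e']
      omega
    have hni := (PySem.Chars.find_eq_neg_one_iff _ _).mp h1
    have hmem : ∀ c ∈ l, ¬(c = 'e' ∨ c = 'E') := by
      intro c hc hce
      exact hni ((List.singleton_infix_iff _ _).mpr
        (hmap ▸ List.mem_map.mpr ⟨c, hc, (lowerChar_eq_e_iff c).mpr hce⟩))
    rw [bSpec, splitE_eq_none l hmem]
  · push_neg at hneg
    obtain ⟨hpref, hmin⟩ := PySem.Chars.find_spec hneg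
    rw [if_neg (by omega)]
    set i0 := PySem.Chars.find (PySem.Chars.lower l) ['e'] with hi0
    set k := i0.toNat with hkdef
    have hk : (PySem.Chars.lower l)[k]? = some 'e' := by
      rw [← List.head?_drop]
      exact (hhead _ _).mp hpref
    have hkl : ∃ c, l[k]? = some c ∧ (c = 'e' ∨ c = 'E') := by
      have hk' : (l[k]?).map PySem.Chars.lowerChar = some 'e' := by
        rw [← List.getElem?_map, ← hmap]
        exact hk
      rcases hop : l[k]? with - | c
      · rw [hop] at hk'; simp at hk'
      · rw [hop] at hk'
        simp only [Option.map_some, Option.some.injEq] at hk'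
        exact ⟨c, rfl, (lowerChar_eq_e_iff c).mp hk'⟩
    obtain ⟨c, hcget, hce⟩ := hkl
    have hsplit := splitE_eq_some l k
      (by rcases hce with rfl | rfl
          · exact Or.inl hcget
          · exact Or.inr hcget)
      (by intro j hj
          have hj' := hmin j hj
          rw [hhead, List.head?_drop] at hj'
          constructor <;> intro hgl <;> apply hj' <;>
            rw [hmap, List.getElem?_map, hgl] <;> rfl)
    have hslice1 : PySem.List.slice (PySem.Chars.lower l) (some (i0 + 1)) none
        = (PySem.Chars.lower l).drop (k + 1) := by
      rw [PySem.List.slice_from _ (by omega)]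
      congr 1
      omega
    by_cases hin : PySem.Chars.isIn ['e']
        (PySem.List.slice (PySem.Chars.lower l) (some (i0 + 1)) none) = true
    · rw [if_pos hin]
      rw [hslice1, PySem.Chars.isIn_iff_infix, List.singleton_infix_iff] at hin
      have hin' : 'e' ∈ (l.drop (k + 1)).map PySem.Chars.lowerChar := by
        rw [List.map_drop, ← hmap]
        exact hin
      obtain ⟨c2, hc2, hc2e⟩ := List.mem_map.mp hin'
      rw [bSpec, hsplit]
      simp [validPart_false_of_mem _ c2 hc2 ((lowerChar_eq_e_iff c2).mp hc2e)]
    · rw [if_neg hin]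
      rw [bSpec, hsplit]
      rw [PySem.List.slice_to _ hneg,
        PySem.List.slice_from _ (by omega : (0:Int) ≤ i0 + 1)]
      have h2 : (i0 + 1).toNat = k + 1 := by omega
      rw [h2, ← hkdef]

-- ===== VERDICT (by name: the statement is the Claim_ definition above) =====
theorem isNumber_spec : Claim_equal_isNumber := by
  intro s _
  unfold Spec_isNumber isNumber isNumber_alt
  rw [goTop, bTop]
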